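-- pv_equiv track=rewrite | github.com/bhavy67/ai-ml-python | Bootcamp/Module_7/customer_preference.py | generate_valid_pairs
-- ===== SOURCE A (Python) =====
-- def generate_valid_pairs(preferences):
--     valid_pairs = []
--
--     top_two = preferences[:2]
--
--     for i in range(len(preferences)):
--         for j in range(i + 1, len(preferences)):
--             event1 = preferences[i]
--             event2 = preferences[j]
--
--             if event1 in top_two or event2 in top_two:
--                 pair = tuple(sorted((event1, event2)))
--                 valid_pairs.append(pair)
--
--     valid_pairs.sort()
--
--     return valid_pairs
-- ===== SOURCE B (Python) =====
-- def generate_valid_pairs(preferences):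
--     # Partition by membership in the top-two set; emit only top-top combos
--     # and top-other cross pairs instead of scanning all O(n^2) index pairs.
--     tops = set(preferences[:2])
--     a_vals = [p for p in preferences if p in tops]
--     b_vals = [p for p in preferences if p not in tops]
--     pairs = []
--     for i, x in enumerate(a_vals):
--         for y in a_vals[i + 1:]:
--             pairs.append((x, y) if x <= y else (y, x))
--     for x in a_vals:
--         for y in b_vals:
--             pairs.append((x, y) if x <= y else (y, x))
--     pairs.sort()
--     return pairs
-- ===== Notes on version B (the rewrite author's own statement) =====
-- stated objective: faster
-- what changed: Instead of scanning all O(n^2) index pairs and testing each against the top-two list, B partitions the values once into top-two members A and the rest B and enumerates only A-A combinations plus A-B cross pairs, then sorts.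
import Mathlib
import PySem

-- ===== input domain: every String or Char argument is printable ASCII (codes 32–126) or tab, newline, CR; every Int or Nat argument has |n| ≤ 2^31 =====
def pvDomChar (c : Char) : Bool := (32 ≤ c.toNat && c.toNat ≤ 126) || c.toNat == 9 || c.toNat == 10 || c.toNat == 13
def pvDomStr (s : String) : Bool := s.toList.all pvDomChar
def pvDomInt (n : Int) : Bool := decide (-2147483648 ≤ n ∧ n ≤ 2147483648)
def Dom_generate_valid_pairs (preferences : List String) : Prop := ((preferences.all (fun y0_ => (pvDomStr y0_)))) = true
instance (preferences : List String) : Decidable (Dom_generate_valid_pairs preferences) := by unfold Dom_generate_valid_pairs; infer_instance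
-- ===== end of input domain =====

-- B partitions the values by top-two membership and enumerates only top-top combinations
-- plus top-other cross pairs instead of testing all O(n^2) index pairs (objective: faster).


-- ===== PORT A =====
-- tuple(sorted((a, b))) on a two-element tuple: the smaller component first (exact for 2 elements)
def pvSortPair (a b : String) : String × String := if a ≤ b then (a, b) else (b, a)

def generate_valid_pairs (preferences : List String) : List (String × String) :=
  let top_two := PySem.List.slice preferences none (some 2)
  let valid_pairs :=
    (PySem.List.pyRange 0 (PySem.List.len preferences)).foldl
      (fun acc i =>
        (PySem.List.pyRange (i + 1) (PySem.List.len preferences)).foldl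
          (fun acc j =>
            let event1 := PySem.List.pyGetD preferences i ""
            let event2 := PySem.List.pyGetD preferences j ""
            if event1 ∈ top_two ∨ event2 ∈ top_two then acc ++ [pvSortPair event1 event2]
            else acc)
          acc)
      []
  PySem.List.sorted2 valid_pairs Prod.fst Prod.snd

-- ===== PORT B =====
-- 'for i, x in enumerate(a_vals): for y in a_vals[i+1:]' — each element paired with its tail
def pvAAPairs : List String → List (String × String)
  | [] => []
  | x :: rest => rest.map (pvSortPair x) ++ pvAAPairs rest

def generate_valid_pairs_alt (preferences : List String) : List (String × String) :=
  let tops : PySem.Set String := PySem.Set.ofList (preferences.take 2)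
  let a_vals := preferences.filter (fun p => decide (p ∈ tops))
  let b_vals := preferences.filter (fun p => decide (p ∉ tops))
  let pairs := pvAAPairs a_vals ++ a_vals.flatMap (fun x => b_vals.map (pvSortPair x))
  PySem.List.sorted2 pairs Prod.fst Prod.snd

-- ===== PRECONDITION & SPEC =====
def Spec_generate_valid_pairs (preferences : List String) (out : List (String × String)) : Prop := out = generate_valid_pairs_alt preferences
instance (preferences : List String) (out : List (String × String)) : Decidable (Spec_generate_valid_pairs preferences out) := by unfold Spec_generate_valid_pairs; infer_instance

-- ===== CLAIM (what is proved, stated in full; the proofs are below) =====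
def Claim_equal_generate_valid_pairs : Prop := ∀ (preferences : List String), Dom_generate_valid_pairs preferences → Spec_generate_valid_pairs preferences (generate_valid_pairs preferences)

-- ===== LEMMAS AND PROOFS =====

theorem pvSortPair_comm (a b : String) : pvSortPair a b = pvSortPair b a := by
  unfold pvSortPair
  by_cases h : a ≤ b <;> by_cases h' : b ≤ a
  · have hab : a = b := le_antisymm h h'
    subst hab; rfl
  · simp [h, h']
  · simp [h, h']
  · exact absurd (le_total a b) (by simp [h, h'])

-- Python's tuple sort order is the lexicographic order on pairs
theorem sorted2_eq_sorted_toLex (xs : List (String × String)) :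
    PySem.List.sorted2 xs Prod.fst Prod.snd = PySem.List.sorted xs (fun p => toLex p) := by
  rw [PySem.List.sorted_eq_foldl_insertBy]
  show List.foldl (fun acc x => PySem.List.insertBy _ x acc) [] xs = _
  congr 1
  funext acc x
  congr 1
  funext a b
  rcases lt_trichotomy a.1 b.1 with h | h | h
  · simp [Prod.Lex.toLex_lt_toLex, h]
  · simp [Prod.Lex.toLex_lt_toLex, h]
  · simp [Prod.Lex.toLex_lt_toLex, h, lt_asymm h, ne_of_gt h]

theorem flatMap_cons_coe {α β : Type} (l : List α) (f : α → β) (g : α → List β) :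
    (↑(l.flatMap fun a => f a :: g a) : Multiset β) = ↑(l.map f) + ↑(l.flatMap g) := by
  induction l with
  | nil => simp
  | cons x t ih =>
    simp only [List.flatMap_cons, List.map_cons, ← Multiset.coe_add, ih, ← Multiset.cons_coe,
      ← Multiset.singleton_add]
    abel

-- structural form of A's double loop over a fixed top list
def pvPairsAll (top : List String) : List String → List (String × String)
  | [] => []
  | x :: rest =>
      (rest.filter (fun y => decide (x ∈ top ∨ y ∈ top))).map (pvSortPair x) ++ pvPairsAll top rest

-- the multiset of pairs A collects equals B's top-top combos plus top-other cross pairs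
theorem pairs_perm (top : List String) (l : List String) :
    (pvPairsAll top l).Perm
      (pvAAPairs (l.filter (fun y => decide (y ∈ top))) ++
        (l.filter (fun y => decide (y ∈ top))).flatMap
          (fun x => (l.filter (fun y => !decide (y ∈ top))).map (pvSortPair x))) := by
  refine Multiset.coe_eq_coe.mp ?_
  induction l with
  | nil => simp [pvPairsAll, pvAAPairs]
  | cons x rest ih =>
    by_cases hx : x ∈ top
    · have hfilt : rest.filter (fun y => decide (x ∈ top ∨ y ∈ top)) = rest :=
        List.filter_eq_self.mpr (fun y _ => by simp [hx])
      have hsplit : (↑(rest.map (pvSortPair x)) : Multiset (String × String))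
          = ↑((rest.filter (fun y => decide (y ∈ top))).map (pvSortPair x))
            + ↑((rest.filter (fun y => !decide (y ∈ top))).map (pvSortPair x)) := by
        have h := ((List.filter_append_perm (fun y => decide (y ∈ top)) rest).map
          (pvSortPair x)).symm
        have := Multiset.coe_eq_coe.mpr h
        simpa [List.map_append, ← Multiset.coe_add] using this
      have ih' := ih
      simp only [← Multiset.coe_add] at ih'
      show (↑(pvPairsAll top (x :: rest)) : Multiset (String × String)) = _
      simp only [pvPairsAll]
      rw [hfilt]
      simp [hx, pvAAPairs, List.flatMap_cons,
        ← Multiset.coe_add, ih', hsplit]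
      abel
    · have hfilt : rest.filter (fun y => decide (x ∈ top ∨ y ∈ top))
          = rest.filter (fun y => decide (y ∈ top)) :=
        List.filter_congr (fun y _ => by simp [hx])
      have hcross : (↑((rest.filter (fun y => decide (y ∈ top))).flatMap
            (fun a => pvSortPair a x :: (rest.filter (fun y => !decide (y ∈ top))).map
              (pvSortPair a))) : Multiset (String × String))
          = ↑((rest.filter (fun y => decide (y ∈ top))).map (pvSortPair x))
            + ↑((rest.filter (fun y => decide (y ∈ top))).flatMap
                (fun a => (rest.filter (fun y => !decide (y ∈ top))).map (pvSortPair a))) := by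
        have hm := flatMap_cons_coe (rest.filter (fun y => decide (y ∈ top)))
          (fun a => pvSortPair a x)
          (fun a => (rest.filter (fun y => !decide (y ∈ top))).map (pvSortPair a))
        have hmap : (rest.filter (fun y => decide (y ∈ top))).map (fun a => pvSortPair a x)
            = (rest.filter (fun y => decide (y ∈ top))).map (pvSortPair x) :=
          List.map_congr_left (fun a _ => (pvSortPair_comm x a).symm)
        rw [hmap] at hm
        exact hm
      have ih' := ih
      simp only [← Multiset.coe_add] at ih'
      show (↑(pvPairsAll top (x :: rest)) : Multiset (String × String)) = _
      simp only [pvPairsAll]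
      rw [hfilt]
      simp [hx, List.map_cons, ← Multiset.coe_add, ih', hcross]
      abel
-- inner loop: a fold over pyRange j-indices is a filter+map over the dropped suffix
theorem inner_eq (l : List String) (top : List String) (e1 : String) {a : Int} (h : 0 ≤ a)
    (acc : List (String × String)) :
    (PySem.List.pyRange a (PySem.List.len l)).foldl
      (fun acc j =>
        if e1 ∈ top ∨ PySem.List.pyGetD l j "" ∈ top then
          acc ++ [pvSortPair e1 (PySem.List.pyGetD l j "")]
        else acc) acc
    = acc ++ ((l.drop a.toNat).filter (fun y => decide (e1 ∈ top ∨ y ∈ top))).map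
        (pvSortPair e1) := by
  rw [PySem.List.foldl_pyRange_pyGetD l ""
    (fun acc y => if e1 ∈ top ∨ y ∈ top then acc ++ [pvSortPair e1 y] else acc) acc h]
  exact PySem.List.foldl_append_ite _ _ _ _

theorem range_flat (top : List String) (l : List String) :
    (List.range l.length).flatMap
      (fun k => ((l.drop (k + 1)).filter
          (fun y => decide (l.getD k "" ∈ top ∨ y ∈ top))).map (pvSortPair (l.getD k "")))
    = pvPairsAll top l := by
  induction l with
  | nil => simp [pvPairsAll]
  | cons x rest ih =>
    rw [List.length_cons, List.range_succ_eq_map]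
    simp only [List.flatMap_cons, List.flatMap_map, List.getD_cons_succ, List.getD_cons_zero,
      List.drop_succ_cons, List.drop_zero, pvPairsAll]
    rw [ih]

-- A's pyRange double loop computes pvPairsAll
theorem loopA_eq (top : List String) (l : List String) :
    ((PySem.List.pyRange 0 (PySem.List.len l)).foldl
      (fun acc i =>
        (PySem.List.pyRange (i + 1) (PySem.List.len l)).foldl
          (fun acc j =>
            if PySem.List.pyGetD l i "" ∈ top ∨ PySem.List.pyGetD l j "" ∈ top then
              acc ++ [pvSortPair (PySem.List.pyGetD l i "") (PySem.List.pyGetD l j "")]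
            else acc)
          acc)
      []) = pvPairsAll top l := by
  have hbody : ∀ (acc : List (String × String)) (i : Int),
      i ∈ PySem.List.pyRange 0 (PySem.List.len l) →
      ((PySem.List.pyRange (i + 1) (PySem.List.len l)).foldl
        (fun acc j =>
          if PySem.List.pyGetD l i "" ∈ top ∨ PySem.List.pyGetD l j "" ∈ top then
            acc ++ [pvSortPair (PySem.List.pyGetD l i "") (PySem.List.pyGetD l j "")]
          else acc)
        acc)
      = acc ++ ((l.drop (i + 1).toNat).filter
          (fun y => decide (PySem.List.pyGetD l i "" ∈ top ∨ y ∈ top))).map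
            (pvSortPair (PySem.List.pyGetD l i "")) := by
    intro acc i hi
    have h0 : (0 : Int) ≤ i := (PySem.List.mem_pyRange_one.mp hi).1
    exact inner_eq l top (PySem.List.pyGetD l i "") (by omega) acc
  refine Eq.trans (PySem.List.foldl_congr_mem _ _
    (fun acc i => acc ++ ((l.drop (i + 1).toNat).filter
      (fun y => decide (PySem.List.pyGetD l i "" ∈ top ∨ y ∈ top))).map
        (pvSortPair (PySem.List.pyGetD l i ""))) _ hbody) ?_
  rw [PySem.List.foldl_append_eq_flatMap, List.nil_append]
  rw [show PySem.List.len l = ((l.length : Nat) : Int) from rfl,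
    PySem.List.pyRange_zero_natCast, List.flatMap_map]
  have hfun : (fun k : Nat =>
      ((l.drop ((k : Int) + 1).toNat).filter
        (fun y => decide (PySem.List.pyGetD l (k : Int) "" ∈ top ∨ y ∈ top))).map
          (pvSortPair (PySem.List.pyGetD l (k : Int) "")))
      = (fun k : Nat =>
      ((l.drop (k + 1)).filter
        (fun y => decide (l.getD k "" ∈ top ∨ y ∈ top))).map (pvSortPair (l.getD k ""))) :=
    funext fun k => by
      simp [PySem.List.pyGetD_natCast, show ((k : Int) + 1).toNat = k + 1 from by omega]
  rw [hfun, range_flat]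

theorem generate_valid_pairs_spec : Claim_equal_generate_valid_pairs := by
  intro prefs _
  show generate_valid_pairs prefs = generate_valid_pairs_alt prefs
  have hslice : PySem.List.slice prefs none (some 2) = prefs.take 2 := by
    simpa using PySem.List.slice_to prefs (by norm_num : (0 : Int) ≤ 2)
  simp only [generate_valid_pairs, generate_valid_pairs_alt, hslice]
  rw [sorted2_eq_sorted_toLex, sorted2_eq_sorted_toLex]
  apply PySem.List.sorted_eq_sorted_of_perm _ _ _ toLex.injective
  rw [loopA_eq (prefs.take 2) prefs]
  have hf1 : prefs.filter (fun p => decide (p ∈ (PySem.Set.ofList (prefs.take 2) : PySem.Set String)))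
      = prefs.filter (fun y => decide (y ∈ prefs.take 2)) :=
    List.filter_congr fun y _ => by simp [PySem.Set.mem_ofList]
  have hf2 : prefs.filter (fun p => decide (p ∉ (PySem.Set.ofList (prefs.take 2) : PySem.Set String)))
      = prefs.filter (fun y => !decide (y ∈ prefs.take 2)) :=
    List.filter_congr fun y _ => by simp [PySem.Set.mem_ofList]
  rw [hf1, hf2]
  exact pairs_perm (prefs.take 2) prefs
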